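-- pv_equiv track=rewrite | github.com/romangolovkou/AQteck_toolMAX | AQ_lib/AQ_Devices/SystemLibrary/AqGenericModbusLibrary.py | get_device_descr
-- ===== SOURCE A (Python) =====
-- def get_device_descr(data: list):
--     dev_descr_dict = dict()
--     start = None
--     end = None
--     for i in range(len(data)):
--         # Єлемент з індексом 0 - може містити хедер блоку (ключ початку та кінця блоку у файлі)
--         config_string = data[i]
--         fields = config_string.split(';')
--         if fields[0] == '!Device_descr_area':
--             start = i
--         if fields[0] == '!/Device_descr_area':
--             end = i
--             break
--
--     if start is None or end is None:
--         raise Exception('AqGenericModbusError: Configuration can`t read. Can`t find "Device_descr_area" in file')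
--
--     for i in range(start + 1, end):
--         config_string = data[i]
--         # Разделение записи на поля по символу ';'
--         fields = config_string.split(';')
--         # єлемент з індексом 0 - ключ, єлемент з індексом 1 - значення
--         dev_descr_dict[fields[0]] = fields[1]
--
--     return dev_descr_dict
-- ===== SOURCE B (Python) =====
-- def get_device_descr(data: list):
--     # Single pass: collect split lines of the current descr segment, resetting on
--     # each start marker; stop at the first end marker; build the dict afterwards.
--     segment = None
--     ended = False
--     for line in data:
--         fields = line.split(';')
--         if fields[0] == '!Device_descr_area':
--             segment = []
--         elif fields[0] == '!/Device_descr_area':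
--             ended = True
--             break
--         elif segment is not None:
--             segment.append(fields)
--     if segment is None or not ended:
--         raise Exception('AqGenericModbusError: Configuration can`t read. Can`t find "Device_descr_area" in file')
--     result = {}
--     for fields in segment:
--         result[fields[0]] = fields[1]
--     return result
-- ===== Notes on version B (the rewrite author's own statement) =====
-- stated objective: simpler
-- what changed: Replaces A's two index-driven passes (marker search by range(len(data)) then a second indexed slice pass) with one structural pass over the lines that accumulates the segment's split fields directly (reset on each start marker, break on end), then builds the dict from the collected segment.
import Mathlib
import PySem

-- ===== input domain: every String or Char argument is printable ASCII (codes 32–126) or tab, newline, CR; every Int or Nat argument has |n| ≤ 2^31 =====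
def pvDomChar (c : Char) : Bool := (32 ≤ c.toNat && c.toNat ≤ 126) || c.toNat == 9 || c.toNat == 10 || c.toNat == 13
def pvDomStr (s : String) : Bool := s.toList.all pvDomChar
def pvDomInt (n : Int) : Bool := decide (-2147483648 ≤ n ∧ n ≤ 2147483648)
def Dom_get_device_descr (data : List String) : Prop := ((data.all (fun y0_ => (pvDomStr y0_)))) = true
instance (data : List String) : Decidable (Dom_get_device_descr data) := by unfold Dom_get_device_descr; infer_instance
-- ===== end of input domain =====

-- B replaces A's two index-driven passes with one structural pass that accumulates
-- the segment's split lines directly (objective: simpler). Equivalence is on the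
-- return value, on inputs where the Python A returns (Pre_ below).

-- ===== PORT A =====
-- fields = config_string.split(';') (A's copy; sep ";" ≠ "" so split? is always some, getD only makes it total)
def pvFieldsA (s : String) : List String := (PySem.Str.split? s ";").getD [s]

-- first loop of A: scan by index i, track start (last start marker), break on end marker
def pvAScan : List String → Int → Option Int → Option Int × Option Int
  | [], _, start => (start, none)
  | s :: rest, i, start =>
    let f0 := PySem.List.pyGetD (pvFieldsA s) 0 ""
    let start' := if f0 = "!Device_descr_area" then some i else start
    if f0 = "!/Device_descr_area" then (start', some i)
    else pvAScan rest (i + 1) start'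

def get_device_descr (data : List String) : List (String × String) :=
  match pvAScan data 0 none with
  | (some start, some e) =>
    -- second loop: for i in range(start+1, end): dict[fields[0]] = fields[1]
    ((PySem.List.pyRange (start + 1) e 1).foldl (fun d i =>
        let fields := pvFieldsA (PySem.List.pyGetD data i "")
        d.insert (PySem.List.pyGetD fields 0 "") (PySem.List.pyGetD fields 1 ""))
      PySem.Dict.empty).items
  | _ => []  -- Python raises here (missing marker); excluded by Pre_

-- ===== PORT B =====
-- fields = line.split(';') (B's copy of the same total split)
def pvFields (s : String) : List String := (PySem.Str.split? s ";").getD [s]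

-- single pass of B: segment = None | collected fields lists; returns (segment, ended)
def pvBScan : List String → Option (List (List String)) → Option (List (List String)) × Bool
  | [], seg => (seg, false)
  | line :: rest, seg =>
    let fields := pvFields line
    if PySem.List.pyGetD fields 0 "" = "!Device_descr_area" then pvBScan rest (some [])
    else if PySem.List.pyGetD fields 0 "" = "!/Device_descr_area" then (seg, true)
    else match seg with
      | some l => pvBScan rest (some (l ++ [fields]))
      | none => pvBScan rest none

def get_device_descr_alt (data : List String) : List (String × String) :=
  let r := pvBScan data none
  if r.2 then
    match r.1 with
    | some seg =>
      (seg.foldl (fun d fields =>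
          d.insert (PySem.List.pyGetD fields 0 "") (PySem.List.pyGetD fields 1 ""))
        PySem.Dict.empty).items
    | none => []  -- Python raises here (no start marker); excluded by Pre_
  else []  -- Python raises here (no end marker); excluded by Pre_

-- ===== PRECONDITION & SPEC =====
-- Pre_: exactly the inputs where Python A returns: a first end marker exists, some start
-- marker precedes it, and every line strictly between that start and the end splits into
-- ≥ 2 fields (otherwise A raises Exception or IndexError).
-- Pre_'s own copy of the split (closed-form shape condition on the input lines)
def pvPreFields (s : String) : List String := (PySem.Str.split? s ";").getD [s]

def Pre_get_device_descr (data : List String) : Prop :=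
  ∃ e, e < data.length ∧
    PySem.List.pyGetD (pvPreFields (data.getD e "")) 0 "" = "!/Device_descr_area" ∧
    (∀ j, j < e → PySem.List.pyGetD (pvPreFields (data.getD j "")) 0 "" ≠ "!/Device_descr_area") ∧
    ∃ s, s < e ∧ PySem.List.pyGetD (pvPreFields (data.getD s "")) 0 "" = "!Device_descr_area" ∧
      ∀ i, i < e → s < i → 2 ≤ (pvPreFields (data.getD i "")).length
instance (data : List String) : Decidable (Pre_get_device_descr data) := by
  unfold Pre_get_device_descr; infer_instance

def pvWitness_get_device_descr : List String :=
  ["x", "!Device_descr_area", "key;val", "a;b", "!/Device_descr_area", "junk"]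

def Spec_get_device_descr (data : List String) (out : List (String × String)) : Prop := out = get_device_descr_alt data
instance (data : List String) (out : List (String × String)) : Decidable (Spec_get_device_descr data out) := by unfold Spec_get_device_descr; infer_instance

-- ===== CLAIM (what is proved, stated in full; the proofs are below) =====
def Claim_equal_get_device_descr : Prop := ∀ (data : List String), Dom_get_device_descr data → Pre_get_device_descr data → Spec_get_device_descr data (get_device_descr data)

-- ===== LEMMAS AND PROOFS =====

theorem pvFieldsA_eq : pvFieldsA = pvFields := rfl

-- the shared dict-update step: dict[fields[0]] = fields[1]
def pvStep (d : PySem.Dict String String) (fields : List String) : PySem.Dict String String :=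
  d.insert (PySem.List.pyGetD fields 0 "") (PySem.List.pyGetD fields 1 "")

-- what A does after its first loop, as a function of the scan result
def pvAFinish (data : List String) : Option Int × Option Int → List (String × String)
  | (some start, some e) =>
    ((PySem.List.pyRange (start + 1) e 1).foldl (fun d i =>
        pvStep d (pvFieldsA (PySem.List.pyGetD data i ""))) PySem.Dict.empty).items
  | _ => []

-- what B does after its pass, as a function of the scan result
def pvBFinish : Option (List (List String)) × Bool → List (String × String)
  | (some seg, true) => (seg.foldl pvStep PySem.Dict.empty).items
  | _ => []

theorem pvA_eq_finish (data : List String) :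
    get_device_descr data = pvAFinish data (pvAScan data 0 none) := by
  unfold get_device_descr pvAFinish pvStep
  rcases pvAScan data 0 none with ⟨_ | s, _ | e⟩ <;> rfl

theorem pvB_eq_finish (data : List String) :
    get_device_descr_alt data = pvBFinish (pvBScan data none) := by
  unfold get_device_descr_alt pvBFinish
  rcases pvBScan data none with ⟨_ | seg, _ | _⟩ <;> rfl

-- joint scan invariant: A's tracked start index corresponds to B's collected segment
theorem pvMain : ∀ (rest pre : List String) (start : Option Int) (seg : Option (List (List String))),
    ((start = none ∧ seg = none) ∨
      ∃ s : Nat, start = some (s : Int) ∧ s < pre.length ∧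
        seg = some ((pre.drop (s + 1)).map pvFields)) →
    pvAFinish (pre ++ rest) (pvAScan rest (pre.length : Int) start) = pvBFinish (pvBScan rest seg) := by
  intro rest
  induction rest with
  | nil =>
    intro pre start seg hinv
    rcases start with _ | s <;> rcases seg with _ | L <;> rfl
  | cons line rest ih =>
    intro pre start seg hinv
    by_cases h1 : PySem.List.pyGetD (pvFields line) 0 "" = "!Device_descr_area"
    · -- start marker: A records i, B resets the segment
      have hne : ("!Device_descr_area" : String) ≠ "!/Device_descr_area" := by decide
      simp only [pvAScan, pvBScan, pvFieldsA_eq, h1, hne]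
      have h := ih (pre ++ [line]) (some (pre.length : Int)) (some [])
        (Or.inr ⟨pre.length, rfl, by simp, by simp⟩)
      simpa [List.append_assoc] using h
    · by_cases h2 : PySem.List.pyGetD (pvFields line) 0 "" = "!/Device_descr_area"
      · -- end marker: both stop; relate A's indexed fold to B's collected segment
        have hne2 : ("!/Device_descr_area" : String) ≠ "!Device_descr_area" := by decide
        simp only [pvAScan, pvBScan, pvFieldsA_eq, h2, hne2, if_false, if_true]
        rcases hinv with ⟨hs, hg⟩ | ⟨s, hs, hlt, hg⟩
        · subst hs; subst hg; rfl
        · subst hs; subst hg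
          simp only [pvAFinish, pvBFinish, pvFieldsA_eq]
          congr 1
          rw [PySem.List.foldl_congr_mem
              (g := fun d i => pvStep d (pvFields (PySem.List.pyGetD pre i "")))]
          · have hcast : ((s : Int) + 1) = ((s + 1 : Nat) : Int) := by push_cast; ring
            rw [hcast, PySem.List.foldl_pyRange_pyGetD' pre ""
                (fun d fs => pvStep d (pvFields fs)) PySem.Dict.empty (by positivity)]
            rw [List.foldl_map]
            simp
          · intro acc i hi
            rcases (PySem.List.mem_pyRange_one).1 hi with ⟨hi1, hi2⟩
            have h0 : 0 ≤ i := by omega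
            have hilen : i < ((pre ++ line :: rest).length : Int) := by
              simp only [List.length_append, List.length_cons]; push_cast; omega
            rw [PySem.List.pyGetD_eq_getElem (pre ++ line :: rest) "" h0 hilen,
                PySem.List.pyGetD_eq_getElem pre "" h0 hi2]
            congr 2
            exact List.getElem_append_left (by omega)
      · -- ordinary line: A keeps start, B appends to the segment (if open)
        rcases hinv with ⟨hs, hg⟩ | ⟨s, hs, hlt, hg⟩
        · subst hs; subst hg
          simp only [pvAScan, pvBScan, pvFieldsA_eq, h1, h2, if_false]
          have h := ih (pre ++ [line]) none none (Or.inl ⟨rfl, rfl⟩)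
          simpa [List.append_assoc] using h
        · subst hs; subst hg
          simp only [pvAScan, pvBScan, pvFieldsA_eq, h1, h2, if_false]
          have h := ih (pre ++ [line]) (some (s : Int))
            (some (((pre.drop (s + 1)) ++ [line]).map pvFields))
            (Or.inr ⟨s, rfl, by simp; omega,
              by rw [List.drop_append_of_le_length (by omega)]⟩)
          simpa [List.append_assoc] using h

-- ===== VERDICT (by name: the statement is the Claim_ definition above) =====
theorem get_device_descr_spec : Claim_equal_get_device_descr := by
  intro data _ _
  unfold Spec_get_device_descr
  rw [pvA_eq_finish, pvB_eq_finish]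
  have h := pvMain data [] none none (Or.inl ⟨rfl, rfl⟩)
  simpa using h
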